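-- pv_equiv track=rewrite | github.com/ThomasTrepanier/log6307-final-project | data/interim/stackoverflow/src/python/9_29.py | my_fancy_test
-- ===== SOURCE A (Python) =====
-- def my_fancy_test(my_list):
--     pattern = ['a', 'b']
--     if not len(my_list) % len(pattern) == 0:
--         return False
--     for i in range(0, len(my_list)):
--         if not my_list[i] == pattern[i % len(pattern)]:
--             return False
--     return True
-- ===== SOURCE B (Python) =====
-- def my_fancy_test(my_list):
--     return my_list == ['a', 'b'] * (len(my_list) // 2)
-- ===== Notes on version B (the rewrite author's own statement) =====
-- stated objective: simpler
-- what changed: B builds the expected repeated pattern ['a','b']*(len//2) once and returns a single list equality, replacing A's modulo guard plus element-by-element index loop.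
import Mathlib
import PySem

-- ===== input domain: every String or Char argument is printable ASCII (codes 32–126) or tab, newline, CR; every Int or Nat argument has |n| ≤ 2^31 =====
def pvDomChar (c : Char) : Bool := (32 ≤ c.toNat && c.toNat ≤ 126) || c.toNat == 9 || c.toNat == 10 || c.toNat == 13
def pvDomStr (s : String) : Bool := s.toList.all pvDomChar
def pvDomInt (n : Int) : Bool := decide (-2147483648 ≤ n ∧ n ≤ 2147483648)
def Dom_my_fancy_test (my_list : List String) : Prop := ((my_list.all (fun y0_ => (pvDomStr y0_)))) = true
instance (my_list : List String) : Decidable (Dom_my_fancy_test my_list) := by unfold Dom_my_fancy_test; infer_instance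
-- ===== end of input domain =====

-- B replaces A's modulo guard + index loop by a single equality with the pattern repeated len//2 times (objective: simpler).

-- ===== PORT A =====
-- literal port: guard on len % 2, then the index loop as a foldl over range(0, len)
-- (the early `return False` is rendered as the &&-accumulator going false).
def my_fancy_test (my_list : List String) : Bool :=
  let pattern : List String := ["a", "b"]
  if !(my_list.length % pattern.length == 0) then false
  else
    (PySem.List.pyRange 0 my_list.length 1).foldl
      (fun ok i =>
        ok && (PySem.List.pyGetD my_list i "" == PySem.List.pyGetD pattern (PySem.Int.mod i 2) ""))
      true

-- ===== PORT B =====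
-- Source B: my_list == ['a','b'] * (len(my_list) // 2)
def my_fancy_test_alt (my_list : List String) : Bool :=
  my_list == (List.replicate (my_list.length / 2) (["a", "b"] : List String)).flatten

-- ===== PRECONDITION & SPEC =====
def Spec_my_fancy_test (my_list : List String) (out : Bool) : Prop := out = my_fancy_test_alt my_list
instance (my_list : List String) (out : Bool) : Decidable (Spec_my_fancy_test my_list out) := by unfold Spec_my_fancy_test; infer_instance

-- ===== CLAIM (what is proved, stated in full; the proofs are below) =====
def Claim_equal_my_fancy_test : Prop := ∀ (my_list : List String), Dom_my_fancy_test my_list → Spec_my_fancy_test my_list (my_fancy_test my_list)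

-- ===== LEMMAS AND PROOFS =====

theorem foldl_and_eq_all {α : Type} (g : α → Bool) :
    ∀ (xs : List α) (b : Bool), xs.foldl (fun ok i => ok && g i) b = (b && xs.all g) := by
  intro xs
  induction xs with
  | nil => intro b; simp
  | cons x xs ih =>
      intro b
      simp [List.foldl, ih, Bool.and_assoc]

theorem range_two_step (n : ℕ) (f : ℕ → Bool) :
    (List.range (n + 2)).all f =
      (f 0 && f 1 && (List.range n).all (fun k => f (k + 2))) := by
  rw [List.range_succ_eq_map, List.range_succ_eq_map]
  simp [List.all_map, Function.comp_def, Bool.and_assoc]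

-- A's loop body at a nonnegative index k, in Nat form
theorem body_natCast (l : List String) (k : ℕ) :
    (PySem.List.pyGetD l (k : Int) "" ==
      PySem.List.pyGetD (["a","b"] : List String) (PySem.Int.mod (k : Int) 2) "")
    = (l.getD k "" == (["a","b"] : List String).getD (k % 2) "") := by
  have hmod : PySem.Int.mod (k : Int) 2 = ((k % 2 : ℕ) : Int) := by
    simp [PySem.Int.mod, Int.fmod_eq_emod]
  rw [hmod, PySem.List.pyGetD_natCast, PySem.List.pyGetD_natCast]

theorem core :
    ∀ (l : List String),
      ((decide (l.length % 2 = 0)) &&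
        (List.range l.length).all
          (fun k => l.getD k "" == (["a","b"] : List String).getD (k % 2) ""))
      = (l == (List.replicate (l.length / 2) (["a","b"] : List String)).flatten) := by
  have H : ∀ (n : ℕ) (l : List String), l.length = n →
      ((decide (l.length % 2 = 0)) &&
        (List.range l.length).all
          (fun k => l.getD k "" == (["a","b"] : List String).getD (k % 2) ""))
      = (l == (List.replicate (l.length / 2) (["a","b"] : List String)).flatten) := by
    intro n
    induction n using Nat.strong_induction_on with
    | _ n ih =>
      intro l hl
      match l with
      | [] => simp
      | [x] => simp
      | x :: y :: rest =>
        have hrl : rest.length < n := by simp at hl; omega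
        have hIH := ih rest.length hrl rest rfl
        have hlen : (x :: y :: rest).length = rest.length + 2 := by simp
        rw [hlen, range_two_step]
        have e2 : (rest.length + 2) % 2 = rest.length % 2 := by omega
        have e3 : (rest.length + 2) / 2 = rest.length / 2 + 1 := by omega
        rw [e2, e3, List.replicate_succ, List.flatten_cons]
        have fk : ∀ k : ℕ,
            ((x :: y :: rest).getD (k + 2) "" == (["a","b"] : List String).getD ((k + 2) % 2) "")
            = (rest.getD k "" == (["a","b"] : List String).getD (k % 2) "") := by
          intro k
          have h : (k + 2) % 2 = k % 2 := by omega
          rw [h]; rfl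
        simp only [fk]
        have f0 : ((x :: y :: rest).getD 0 "" == (["a","b"] : List String).getD (0 % 2) "") = (x == "a") := rfl
        have f1 : ((x :: y :: rest).getD 1 "" == (["a","b"] : List String).getD (1 % 2) "") = (y == "b") := rfl
        rw [f0, f1]
        have hrhs : (x :: y :: rest == ("a" : String) :: "b" :: (List.replicate (rest.length / 2) (["a","b"] : List String)).flatten)
            = ((x == "a") && ((y == "b") && (rest == (List.replicate (rest.length / 2) (["a","b"] : List String)).flatten))) := by
          simp [List.cons_beq_cons]
        rw [show (["a", "b"] ++ (List.replicate (rest.length / 2) (["a","b"] : List String)).flatten)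
              = ("a" : String) :: "b" :: (List.replicate (rest.length / 2) (["a","b"] : List String)).flatten from rfl]
        rw [hrhs, ← hIH]
        cases (x == "a") <;> cases (y == "b") <;>
          cases decide (rest.length % 2 = 0) <;> simp
  exact fun l => H l.length l rfl

-- ===== VERDICT (by name: the statement is the Claim_ definition above) =====
theorem my_fancy_test_spec : Claim_equal_my_fancy_test := by
  intro l _
  unfold Spec_my_fancy_test my_fancy_test my_fancy_test_alt
  simp only []
  rw [foldl_and_eq_all]
  rw [PySem.List.pyRange_one]
  simp only [List.all_map, Int.sub_zero, Int.toNat_natCast]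
  have hb : ∀ k : ℕ, ((fun i => (PySem.List.pyGetD l i "" ==
      PySem.List.pyGetD (["a","b"] : List String) (PySem.Int.mod i 2) "")) ∘ (fun k : ℕ => (0 : Int) + k)) k
      = (l.getD k "" == (["a","b"] : List String).getD (k % 2) "") := by
    intro k
    simp only [Function.comp, Int.zero_add]
    exact body_natCast l k
  rw [funext hb]
  rw [← core l]
  by_cases h : l.length % 2 = 0 <;> simp [h]
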